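-- pv_equiv track=rewrite | github.com/paladin8/riscv-npu | src/riscv_npu/npu/transformer.py | linear_q
-- ===== SOURCE A (Python) =====
-- def _clamp_i8(x: int) -> int:
--     """Clamp an integer to int8 range [-128, 127]."""
--     return max(-128, min(127, x))
--
-- def _dot_i8(a: list[int], b: list[int]) -> int:
--     """Compute dot product of two int8 vectors, returning int32.
--
--     Args:
--         a: First int8 vector.
--         b: Second int8 vector (same length as a).
--
--     Returns:
--         Sum of element-wise products (Python int, no overflow).
--     """
--     total = 0
--     for i in range(len(a)):
--         total += a[i] * b[i]
--     return total
--
-- def linear_q(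
--     x: list[int],
--     weight: list[list[int]],
--     bias: list[int],
--     in_dim: int,
--     out_dim: int,
--     shift: int,
-- ) -> list[int]:
--     """Quantized linear layer: y = clamp((W @ x + b) >> shift).
--
--     Args:
--         x: Input vector, shape (in_dim,), int8 values.
--         weight: Weight matrix, shape (out_dim, in_dim), int8 values.
--         bias: Bias vector, shape (out_dim,), int32 values.
--         in_dim: Input dimension.
--         out_dim: Output dimension.
--         shift: Right-shift for re-quantization.
--
--     Returns:
--         Output vector, shape (out_dim,), int8 values.
--     """
--     result = []
--     for i in range(out_dim):
--         acc = _dot_i8(weight[i], x) + bias[i]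
--         acc = acc >> shift
--         result.append(_clamp_i8(acc))
--     return result
-- ===== SOURCE B (Python) =====
-- def _clamp_i8(x: int) -> int:
--     return max(-128, min(127, x))
--
-- def linear_q(x, weight, bias, in_dim, out_dim, shift):
--     # Column-wise accumulation: keep a full accumulator vector (seeded with the
--     # biases) and fold one input coordinate into every output per step.
--     acc = [bias[i] for i in range(out_dim)]
--     if acc:
--         for j in range(in_dim):
--             acc = [acc[i] + weight[i][j] * x[j] for i in range(out_dim)]
--     return [_clamp_i8(a >> shift) for a in acc]
-- ===== Notes on version B (the rewrite author's own statement) =====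
-- stated objective: alternative
-- what changed: Replaces A's row-wise scalar dot products (one accumulator per output, via a dot helper) with column-wise accumulation: a full accumulator vector seeded with the biases is updated once per input coordinate, then shifted and clamped in a final pass.
-- outside the precondition, e.g. on linear_q([1, 2], [[3]], [0], 2, 1, 0): A returns [3], B raises IndexError
import Mathlib
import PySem

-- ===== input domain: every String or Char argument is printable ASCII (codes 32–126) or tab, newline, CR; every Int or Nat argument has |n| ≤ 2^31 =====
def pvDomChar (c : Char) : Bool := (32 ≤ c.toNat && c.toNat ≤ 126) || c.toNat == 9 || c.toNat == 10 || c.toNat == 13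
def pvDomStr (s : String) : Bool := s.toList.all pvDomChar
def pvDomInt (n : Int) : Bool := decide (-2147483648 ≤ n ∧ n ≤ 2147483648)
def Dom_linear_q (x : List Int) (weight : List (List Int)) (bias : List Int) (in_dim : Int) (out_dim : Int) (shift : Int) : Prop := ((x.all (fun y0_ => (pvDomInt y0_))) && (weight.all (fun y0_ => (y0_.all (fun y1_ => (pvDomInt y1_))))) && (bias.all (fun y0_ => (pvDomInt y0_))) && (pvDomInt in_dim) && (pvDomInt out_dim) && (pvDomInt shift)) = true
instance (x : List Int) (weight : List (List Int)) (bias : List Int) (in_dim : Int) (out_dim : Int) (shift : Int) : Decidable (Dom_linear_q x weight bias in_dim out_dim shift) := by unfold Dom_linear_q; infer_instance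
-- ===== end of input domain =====

-- B replaces A's per-row dot products by a column-wise accumulation over a full
-- accumulator vector (alternative decomposition, same cost; equal on Pre_).

-- ===== PORT A =====
def clampI8 (x : Int) : Int := max (-128) (min 127 x)

def dotI8 (a b : List Int) : Int :=
  (PySem.List.pyRange 0 (a.length : Int) 1).foldl
    (fun total i => total + PySem.List.pyGetD a i 0 * PySem.List.pyGetD b i 0) 0

def linear_q (x : List Int) (weight : List (List Int)) (bias : List Int) (in_dim : Int) (out_dim : Int) (shift : Int) : List Int :=
  (PySem.List.pyRange 0 out_dim 1).foldl
    (fun result i =>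
      let acc := dotI8 (PySem.List.pyGetD weight i []) x + PySem.List.pyGetD bias i 0
      let acc2 := acc >>> shift.toNat
      result ++ [clampI8 acc2]) []

-- ===== PORT B =====
def linear_q_alt (x : List Int) (weight : List (List Int)) (bias : List Int) (in_dim : Int) (out_dim : Int) (shift : Int) : List Int :=
  let acc0 := (PySem.List.pyRange 0 out_dim 1).map (fun i => PySem.List.pyGetD bias i 0)
  let acc := if acc0 = [] then acc0 else
    (PySem.List.pyRange 0 in_dim 1).foldl
      (fun acc j =>
        (PySem.List.pyRange 0 out_dim 1).map
          (fun i => PySem.List.pyGetD acc i 0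
            + PySem.List.pyGetD (PySem.List.pyGetD weight i []) j 0 * PySem.List.pyGetD x j 0)) acc0
  acc.map (fun a : Int => clampI8 (a >>> shift.toNat))

-- ===== PRECONDITION & SPEC =====
-- Pre_ excludes inputs on which A raises (negative shift, rows longer than x, weight or
-- bias shorter than out_dim) and, additionally, ragged inputs where some row of
-- weight[:out_dim] has a length other than in_dim: A ignores in_dim and uses each row's
-- own length, so on such shape-inconsistent inputs A returns a value B does not match.
def Pre_linear_q (x : List Int) (weight : List (List Int)) (bias : List Int) (in_dim : Int) (out_dim : Int) (shift : Int) : Prop :=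
  out_dim ≤ 0 ∨
  (0 ≤ shift ∧ out_dim ≤ (weight.length : Int) ∧ out_dim ≤ (bias.length : Int) ∧
   in_dim ≤ (x.length : Int) ∧
   ∀ row ∈ weight.take out_dim.toNat, (row.length : Int) = in_dim)
instance (x : List Int) (weight : List (List Int)) (bias : List Int) (in_dim : Int) (out_dim : Int) (shift : Int) : Decidable (Pre_linear_q x weight bias in_dim out_dim shift) := by unfold Pre_linear_q; infer_instance

def pvWitness_linear_q : List Int × List (List Int) × List Int × Int × Int × Int :=
  ([1, -2, 3], [[4, 5, -6], [7, -8, 9]], [10, -20], 3, 2, 2)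

def Spec_linear_q (x : List Int) (weight : List (List Int)) (bias : List Int) (in_dim : Int) (out_dim : Int) (shift : Int) (out : List Int) : Prop := out = linear_q_alt x weight bias in_dim out_dim shift
instance (x : List Int) (weight : List (List Int)) (bias : List Int) (in_dim : Int) (out_dim : Int) (shift : Int) (out : List Int) : Decidable (Spec_linear_q x weight bias in_dim out_dim shift out) := by unfold Spec_linear_q; infer_instance

-- ===== CLAIM (what is proved, stated in full; the proofs are below) =====
def Claim_equal_linear_q : Prop := ∀ (x : List Int) (weight : List (List Int)) (bias : List Int) (in_dim : Int) (out_dim : Int) (shift : Int), Dom_linear_q x weight bias in_dim out_dim shift → Pre_linear_q x weight bias in_dim out_dim shift → Spec_linear_q x weight bias in_dim out_dim shift (linear_q x weight bias in_dim out_dim shift)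

-- ===== LEMMAS AND PROOFS =====

-- B's accumulation loop, characterised: after folding j over range(m), entry i of the
-- accumulator holds its bias seed plus the sum of the first m products for row i.
lemma alt_loop (od : Int) (b : Int → Int) (t : Int → Int → Int) (m : Nat) :
    (PySem.List.pyRange 0 (m : Int) 1).foldl
      (fun acc j =>
        (PySem.List.pyRange 0 od 1).map
          (fun i => PySem.List.pyGetD acc i 0 + t i j))
      ((PySem.List.pyRange 0 od 1).map b)
    = (PySem.List.pyRange 0 od 1).map
        (fun i => b i + ((PySem.List.pyRange 0 (m : Int) 1).map (t i)).sum) := by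
  induction m with
  | zero =>
      simp [PySem.List.pyRange_one_eq_nil (le_refl (0 : Int))]
  | succ m ih =>
      have hc : ((m + 1 : Nat) : Int) = (m : Int) + 1 := by push_cast; ring
      rw [hc, PySem.List.pyRange_one_succ_right (by positivity), List.foldl_append,
        List.foldl_cons, List.foldl_nil, ih]
      apply List.map_congr_left
      intro i hi
      rw [PySem.List.mem_pyRange_one] at hi
      rw [PySem.List.pyGetD_map_pyRange_of_nonneg _ _ _ _ hi.1 hi.2]
      simp [List.sum_append]
      ring

-- A's dot product as a sum over the first row.length products.
lemma dotI8_eq_sum (a b : List Int) :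
    dotI8 a b = ((PySem.List.pyRange 0 (a.length : Int) 1).map
      (fun i => PySem.List.pyGetD a i 0 * PySem.List.pyGetD b i 0)).sum := by
  simp [dotI8, PySem.List.foldl_add]

-- ===== VERDICT (by name: the statement is the Claim_ definition above) =====
theorem linear_q_spec : Claim_equal_linear_q := by
  intro x weight bias in_dim out_dim shift _ hpre
  unfold Spec_linear_q
  rcases hpre with hod | ⟨hsh, hw, hb, hx, hrows⟩
  · -- out_dim ≤ 0: both sides are []
    simp [linear_q, linear_q_alt, PySem.List.pyRange_one_eq_nil hod]
  · by_cases hod : out_dim ≤ 0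
    · simp [linear_q, linear_q_alt, PySem.List.pyRange_one_eq_nil hod]
    rw [not_le] at hod
    -- in_dim is a row length, hence nonnegative
    have hlen0 : 0 < weight.length := by omega
    have h0take : weight[0] ∈ weight.take out_dim.toNat := by
      have h0 : 0 < (weight.take out_dim.toNat).length := by
        simp only [List.length_take]
        omega
      have := List.getElem_mem h0
      rwa [List.getElem_take] at this
    have hidim : 0 ≤ in_dim := by
      have := hrows _ h0take
      omega
    -- rewrite B's loop with its characterisation
    have hcast : in_dim = ((in_dim.toNat : Nat) : Int) := by omega
    have hne : ((PySem.List.pyRange 0 out_dim 1).map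
        (fun i => PySem.List.pyGetD bias i 0)) ≠ [] := by
      apply List.ne_nil_of_length_pos
      simp only [List.length_map, PySem.List.length_pyRange_one]
      omega
    simp only [linear_q, linear_q_alt]
    rw [if_neg hne, hcast, alt_loop out_dim (fun i => PySem.List.pyGetD bias i 0)
      (fun i j => PySem.List.pyGetD (PySem.List.pyGetD weight i []) j 0 * PySem.List.pyGetD x j 0)
      in_dim.toNat]
    rw [PySem.List.foldl_append_singleton_eq_map, List.nil_append, List.map_map]
    apply List.map_congr_left
    intro i hi
    rw [PySem.List.mem_pyRange_one] at hi
    have hrow : PySem.List.pyGetD weight i ([] : List Int) = weight[i.toNat]'(by omega) :=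
      PySem.List.pyGetD_eq_getElem _ _ hi.1 (by omega)
    have hmem : weight[i.toNat]'(by omega) ∈ weight.take out_dim.toNat := by
      have hlt : i.toNat < (List.take out_dim.toNat weight).length := by
        simp only [List.length_take]; omega
      have := List.getElem_mem hlt
      rwa [List.getElem_take] at this
    have hlen : ((weight[i.toNat]'(by omega)).length : Int) = in_dim := hrows _ hmem
    simp only [Function.comp]
    rw [dotI8_eq_sum, hrow, hlen, hcast, Int.toNat_natCast,
      Int.add_comm _ (PySem.List.pyGetD bias i 0)]
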